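-- pv_equiv track=rewrite | github.com/Edwin-Tu/2026-python | weeks/week-03/solutions/1114405014/test/test490.py | rotate_text
-- ===== SOURCE A (Python) =====
-- def rotate_text(lines):
--     """
--     將文字行順時針旋轉90度
--     最後一行變成最左列，第一行變成最右列
--     """
--     if not lines:
--         return []
--
--     # 找到最長行的長度，用於填充
--     max_length = max(len(line) for line in lines)
--
--     # 將所有行填充到相同長度
--     padded_lines = [line.ljust(max_length) for line in lines]
--
--     # 創建旋轉後的結果
--     result = []
--     for col in range(max_length):
--         # 從第一行開始，向下收集每一列的字元（順時針旋轉）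
--         row_chars = []
--         for row in range(len(padded_lines)):
--             row_chars.append(padded_lines[row][col])
--         # 移除尾部空格並反轉順序
--         rotated_line = ''.join(row_chars[::-1]).rstrip()
--         if rotated_line:  # 只添加非空行
--             result.append(rotated_line)
--
--     return result
-- ===== SOURCE B (Python) =====
-- def rotate_text(lines):
--     if not lines:
--         return []
--     # Peel the leading character of every line per step: no max_length, no padding,
--     # no column indexing.  Each line is kept as a reversed char stack so the next
--     # character to peel is an O(1) pop from the end.
--     stacks = [list(line)[::-1] for line in lines]
--     result = []
--     while any(stacks):
--         col = ''.join((s[-1] if s else ' ') for s in reversed(stacks)).rstrip()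
--         if col:
--             result.append(col)
--         for s in stacks:
--             if s:
--                 s.pop()
--     return result
-- ===== Notes on version B (the rewrite author's own statement) =====
-- stated objective: alternative
-- what changed: Instead of computing max_length, padding every line and gathering each output column by index, B never pads or indexes: it keeps each line as a reversed character stack and repeatedly peels the current leading character of every line (popping the stacks) to emit one rotated line per peeling step until all stacks are empty.
import Mathlib
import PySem

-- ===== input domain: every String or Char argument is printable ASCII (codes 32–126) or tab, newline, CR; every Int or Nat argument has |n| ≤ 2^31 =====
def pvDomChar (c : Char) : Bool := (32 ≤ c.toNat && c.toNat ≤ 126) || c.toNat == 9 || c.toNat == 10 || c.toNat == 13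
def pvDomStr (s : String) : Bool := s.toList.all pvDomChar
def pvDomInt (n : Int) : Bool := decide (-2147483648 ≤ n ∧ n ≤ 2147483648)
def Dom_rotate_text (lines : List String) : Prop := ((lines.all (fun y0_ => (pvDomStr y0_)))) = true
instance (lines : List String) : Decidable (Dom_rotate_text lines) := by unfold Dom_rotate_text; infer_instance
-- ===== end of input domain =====

-- B replaces A's pad-then-gather-columns-by-index algorithm by a peeling loop over reversed
-- character stks: each step pops the leading character of every line and emits one rotated
-- line, until all stks are empty (objective: alternative).

-- ===== PORT A =====
-- line.ljust(m): pad on the right with spaces (exact for m ≥ len, which holds here)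
def pvPad (s : String) (m : Nat) : List Char := s.toList ++ List.replicate (m - s.toList.length) ' '

def rotate_text (lines : List String) : List String :=
  if lines = [] then []
  else
    -- max(len(line) for line in lines): fold of max; seed 0 is exact since lines ≠ [] and lengths ≥ 0
    let maxLen : Nat := (lines.map (fun s => s.toList.length)).foldl Nat.max 0
    let padded : List (List Char) := lines.map (fun s => pvPad s maxLen)
    -- for col in range(max_length)
    (List.range maxLen).foldl (fun result col =>
      -- for row in range(len(padded_lines)): row_chars.append(padded_lines[row][col])
      -- (row runs over all indices in order = fold over padded; [col] is in range, getD is exact)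
      let rowChars : List Char := padded.foldl (fun acc row => acc ++ [row.getD col ' ']) []
      -- ''.join(row_chars[::-1]).rstrip()
      let rotated : List Char := PySem.Chars.rstrip rowChars.reverse
      if rotated ≠ [] then result ++ [String.ofList rotated] else result) []

-- ===== PORT B =====
-- termination fact for the while loop: popping one char from each nonempty stack shrinks the total size
theorem pvSumDropLast_le (stks : List (List Char)) :
    ((stks.map List.dropLast).map List.length).sum ≤ (stks.map List.length).sum := by
  induction stks with
  | nil => simp
  | cons b u ihu =>
    simp only [List.map_cons, List.sum_cons, List.length_dropLast]
    exact Nat.add_le_add (Nat.sub_le _ _) ihu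

theorem pvSumDropLast_lt (stks : List (List Char))
    (h : stks.any (fun s => s ≠ []) = true) :
    ((stks.map List.dropLast).map List.length).sum < (stks.map List.length).sum := by
  induction stks with
  | nil => simp at h
  | cons a t ih =>
    simp only [List.any_cons, Bool.or_eq_true, decide_eq_true_eq] at h
    simp only [List.map_cons, List.sum_cons, List.length_dropLast]
    rcases h with h | h
    · have : 0 < a.length := List.length_pos_of_ne_nil h
      have h2 := pvSumDropLast_le t
      omega
    · have := ih h
      omega

-- while any(stks): emit one rotated line, then pop the tail char of every nonempty stack
-- (stks hold each line's characters reversed; s[-1] = getLastD, the pop = dropLast)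
def rotGo (acc : List String) (stks : List (List Char)) : List String :=
  if h : stks.any (fun s => s ≠ []) = true then
    let col := PySem.Chars.rstrip (stks.reverse.map (fun s => s.getLastD ' '))
    rotGo (if col ≠ [] then acc ++ [String.ofList col] else acc) (stks.map List.dropLast)
  else acc
termination_by (stks.map List.length).sum
decreasing_by simpa using pvSumDropLast_lt stks h

def rotate_text_alt (lines : List String) : List String :=
  if lines = [] then []
  else rotGo [] (lines.map (fun s => s.toList.reverse))

-- ===== PRECONDITION & SPEC =====
def Spec_rotate_text (lines : List String) (out : List String) : Prop := out = rotate_text_alt lines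
instance (lines : List String) (out : List String) : Decidable (Spec_rotate_text lines out) := by unfold Spec_rotate_text; infer_instance

-- ===== CLAIM =====
def Claim_equal_rotate_text : Prop := ∀ (lines : List String), Dom_rotate_text lines → Spec_rotate_text lines (rotate_text lines)

-- ===== LEMMAS AND PROOFS =====

-- the rotated line for column c, shared characterisation of both ports
def pvCol (rows : List (List Char)) (c : Nat) : List Char :=
  PySem.Chars.rstrip (rows.reverse.map (fun r => r.getD c ' '))

def pvOpt (x : List Char) : Option String := if x ≠ [] then some (String.ofList x) else none

theorem init_le_foldl_max (l : List Nat) (b : Nat) : b ≤ l.foldl Nat.max b := by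
  induction l generalizing b with
  | nil => simp
  | cons a t ih => exact le_trans (Nat.le_max_left b a) (ih _)

theorem le_foldl_max (l : List Nat) (b x : Nat) (hx : x ∈ l) : x ≤ l.foldl Nat.max b := by
  induction l generalizing b with
  | nil => cases hx
  | cons a t ih =>
    rcases List.mem_cons.mp hx with h | h
    · subst h
      exact le_trans (Nat.le_max_right b x) (init_le_foldl_max t _)
    · exact ih _ h

theorem foldl_max_sub_one (l : List Nat) (b : Nat) :
    (l.map (fun x => x - 1)).foldl Nat.max (b - 1) = (l.foldl Nat.max b) - 1 := by
  induction l generalizing b with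
  | nil => rfl
  | cons a t ih =>
    simp only [List.map_cons, List.foldl_cons]
    rw [show (b - 1).max (a - 1) = b.max a - 1 by
      simp only [Nat.max_def]
      split_ifs <;> omega]
    exact ih _

theorem foldl_max_zero_of_all_nil (rows : List (List Char)) (h : ∀ r ∈ rows, r = []) :
    ((rows.map List.length).foldl Nat.max 0) = 0 := by
  induction rows with
  | nil => rfl
  | cons a t ih =>
    have ha : a = [] := h a (by simp)
    simp only [List.map_cons, List.foldl_cons, ha, List.length_nil, Nat.max_self]
    exact ih (fun r hr => h r (List.mem_cons_of_mem _ hr))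

theorem getD_drop_one (r : List Char) (c : Nat) (d : Char) :
    (r.drop 1).getD c d = r.getD (c + 1) d := by
  cases r <;> simp [List.getD]

theorem getLastD_reverse (r : List Char) (d : Char) :
    r.reverse.getLastD d = r.headD d := by
  cases r with
  | nil => rfl
  | cons a t => simp [List.getLastD_eq_getLast?, List.getLast?_reverse]

theorem dropLast_reverse_eq (r : List Char) :
    r.reverse.dropLast = (r.drop 1).reverse := by
  cases r with
  | nil => rfl
  | cons a t => simp

theorem foldl_if_append_eq_filterMap (l : List Nat) (acc : List String)
    (g : Nat → List Char) :
    l.foldl (fun res c => if g c ≠ [] then res ++ [String.ofList (g c)] else res) acc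
      = acc ++ l.filterMap (fun c => pvOpt (g c)) := by
  induction l generalizing acc with
  | nil => simp
  | cons a t ih =>
    rw [List.foldl_cons, List.filterMap_cons]
    by_cases h : g a = []
    · rw [if_neg (by simp [h]), ih, show pvOpt (g a) = none by simp [pvOpt, h]]
    · rw [if_pos h, ih, show pvOpt (g a) = some (String.ofList (g a)) by simp [pvOpt, h]]
      simp

-- core lemma: the peeling loop produces exactly the non-empty rstripped columns in order
theorem rotGo_eq (n : Nat) : ∀ (rows : List (List Char)) (acc : List String),
    (rows.map List.length).foldl Nat.max 0 = n →
    rotGo acc (rows.map List.reverse)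
      = acc ++ (List.range n).filterMap (fun c => pvOpt (pvCol rows c)) := by
  induction n with
  | zero =>
    intro rows acc hn
    have hall : ∀ r ∈ rows, r = [] := by
      intro r hr
      have := le_foldl_max (rows.map List.length) 0 r.length (List.mem_map_of_mem hr)
      rw [hn] at this
      exact List.eq_nil_of_length_eq_zero (Nat.le_zero.mp this)
    have hany : (rows.map List.reverse).any (fun s => s ≠ []) = false := by
      simp only [List.any_map, List.any_eq_false]
      intro r hr
      simp [hall r hr]
    rw [rotGo, dif_neg (by rw [hany]; exact Bool.false_ne_true)]
    simp
  | succ m ih =>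
    intro rows acc hn
    have hany : (rows.map List.reverse).any (fun s => s ≠ []) = true := by
      by_contra hc
      have hf : (rows.map List.reverse).any (fun s => s ≠ []) = false :=
        Bool.eq_false_iff.mpr hc
      simp only [List.any_map, List.any_eq_false] at hf
      have : ∀ r ∈ rows, r = [] := by
        intro r hr
        have := hf r hr
        simpa using this
      rw [foldl_max_zero_of_all_nil rows this] at hn
      omega
    rw [rotGo, dif_pos hany]
    have hcol : (rows.map List.reverse).reverse.map (fun s => s.getLastD ' ')
        = rows.reverse.map (fun r => r.getD 0 ' ') := by
      rw [← List.map_reverse, List.map_map]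
      refine List.map_congr_left (fun r _ => ?_)
      simp only [Function.comp_apply, getLastD_reverse]
      cases r <;> simp [List.getD]
    have htails : (rows.map List.reverse).map List.dropLast
        = (rows.map (fun r => r.drop 1)).map List.reverse := by
      simp only [List.map_map]
      exact List.map_congr_left (fun r _ => dropLast_reverse_eq r)
    have hmax : ((rows.map (fun r => r.drop 1)).map List.length).foldl Nat.max 0 = m := by
      have h1 : (rows.map (fun r => r.drop 1)).map List.length
          = (rows.map List.length).map (fun x => x - 1) := by
        simp [List.map_map]
      rw [h1, show (0 : Nat) = 0 - 1 by rfl, foldl_max_sub_one, hn]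
      omega
    rw [hcol, htails, ih (rows.map (fun r => r.drop 1)) _ hmax]
    have hshift : ∀ c : Nat, pvCol (rows.map (fun r => r.drop 1)) c = pvCol rows (c + 1) := by
      intro c
      unfold pvCol
      rw [← List.map_reverse, List.map_map]
      congr 1
      exact List.map_congr_left (fun r _ => getD_drop_one r c ' ')
    have hc0 : PySem.Chars.rstrip (rows.reverse.map (fun r => r.getD 0 ' ')) = pvCol rows 0 := rfl
    have hrange : List.range (m + 1) = 0 :: (List.range m).map Nat.succ :=
      List.range_succ_eq_map
    rw [hc0, hrange, List.filterMap_cons, List.filterMap_map]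
    have hfeq : (List.range m).filterMap (fun c => pvOpt (pvCol (rows.map (fun r => r.drop 1)) c))
        = (List.range m).filterMap ((fun c => pvOpt (pvCol rows c)) ∘ Nat.succ) := by
      refine List.filterMap_congr (fun c _ => ?_)
      simp only [Function.comp_apply, Nat.succ_eq_add_one, hshift c]
    rw [hfeq]
    by_cases h0 : pvCol rows 0 = []
    · rw [if_neg (by simp [h0]),
        show pvOpt (pvCol rows 0) = none from by simp [pvOpt, h0]]
    · rw [if_pos h0,
        show pvOpt (pvCol rows 0) = some (String.ofList (pvCol rows 0)) from by simp [pvOpt, h0]]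
      simp

theorem pvPad_getD (s : String) (m : Nat) (c : Nat) :
    (pvPad s m).getD c ' ' = s.toList.getD c ' ' := by
  unfold pvPad
  rcases Nat.lt_or_ge c s.toList.length with h | h
  · rw [List.getD_eq_getElem _ _ (by rw [List.length_append]; omega),
        List.getElem_append_left h, List.getD_eq_getElem _ _ h]
  · rw [List.getD_eq_default _ _ h]
    rcases Nat.lt_or_ge c (s.toList.length + (m - s.toList.length)) with h2 | h2
    · rw [List.getD_eq_getElem _ _
        (by rw [List.length_append, List.length_replicate]; omega),
        List.getElem_append_right h]
      exact List.getElem_replicate ..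
    · rw [List.getD_eq_default _ _
        (by rw [List.length_append, List.length_replicate]; omega)]

-- ===== VERDICT =====
theorem rotate_text_spec : Claim_equal_rotate_text := by
  intro lines _
  unfold Spec_rotate_text rotate_text rotate_text_alt
  by_cases h : lines = []
  · simp [h]
  · simp only [if_neg h]
    set maxLen : Nat := (lines.map (fun s => s.toList.length)).foldl Nat.max 0 with hm
    have hB : rotGo [] (lines.map (fun s => s.toList.reverse))
        = (List.range maxLen).filterMap (fun c => pvOpt (pvCol (lines.map String.toList) c)) := by
      have h1 : lines.map (fun s => s.toList.reverse) = (lines.map String.toList).map List.reverse := by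
        simp [List.map_map]
      rw [h1, rotGo_eq maxLen (lines.map String.toList) []
        (by simp only [List.map_map]; exact hm.symm)]
      simp
    rw [hB]
    have hcolA : ∀ c : Nat,
        PySem.Chars.rstrip
          (((lines.map (fun s => pvPad s maxLen)).foldl (fun acc row => acc ++ [row.getD c ' ']) []).reverse)
        = pvCol (lines.map String.toList) c := by
      intro c
      rw [PySem.List.foldl_append_singleton_eq_map, List.nil_append]
      unfold pvCol
      congr 1
      rw [← List.map_reverse, ← List.map_reverse, ← List.map_reverse, List.map_map, List.map_map]
      exact List.map_congr_left (fun s _ => pvPad_getD s maxLen c)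
    calc (List.range maxLen).foldl (fun result col =>
            let rowChars := (lines.map (fun s => pvPad s maxLen)).foldl (fun acc row => acc ++ [row.getD col ' ']) []
            let rotated := PySem.Chars.rstrip rowChars.reverse
            if rotated ≠ [] then result ++ [String.ofList rotated] else result) []
        = (List.range maxLen).foldl (fun result col =>
            if pvCol (lines.map String.toList) col ≠ []
            then result ++ [String.ofList (pvCol (lines.map String.toList) col)] else result) [] := by
          apply List.foldl_ext
          intro acc col _
          simp only [hcolA col]
      _ = (List.range maxLen).filterMap (fun c => pvOpt (pvCol (lines.map String.toList) c)) := by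
          rw [foldl_if_append_eq_filterMap]
          simp
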